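-- pv_equiv track=rewrite | github.com/HarjeetSinghGoldy/problems | Geeks/sum_of_subarray.py | minTimeFun
-- ===== SOURCE A (Python) =====
-- def minTimeFun(n, arr):
--     if (n <= 0): return 0
--
--     incl = arr[0]
--     excl = 0
--
--     for i in range(1, n):
--         incl_new = arr[i] + min(excl, incl)
--         excl_new = incl
--         incl = incl_new
--         excl = excl_new
--     return min(incl, excl)
-- ===== SOURCE B (Python) =====
-- def minTimeFun(n, arr):
--     if n <= 0:
--         return 0
--     # Tropical (min-plus) formulation: each element arr[i] (i >= 1) contributes
--     # the 2x2 min-plus matrix (arr[i], 0, arr[i], None); the answer is the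
--     # divide-and-conquer product of these matrices applied to the start vector
--     # (arr[0], 0), then the min of the two components.  None plays +infinity.
--     def oadd(x, y):
--         return None if x is None or y is None else x + y
--
--     def omin(x, y):
--         if x is None:
--             return y
--         if y is None:
--             return x
--         return x if x <= y else y
--
--     def mul(p, q):
--         a, b, c, d = p
--         e, f, g, h = q
--         return (omin(oadd(a, e), oadd(b, g)),
--                 omin(oadd(a, f), oadd(b, h)),
--                 omin(oadd(c, e), oadd(d, g)),
--                 omin(oadd(c, f), oadd(d, h)))
--
--     def prod(ms, lo, hi):
--         if hi - lo == 0: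
--             return (0, None, None, 0)
--         if hi - lo == 1:
--             return ms[lo]
--         mid = (lo + hi) // 2
--         return mul(prod(ms, lo, mid), prod(ms, mid, hi))
--
--     ms = [(x, 0, x, None) for x in arr[1:n]]
--     p = prod(ms, 0, len(ms))
--     v = (arr[0], 0)
--     incl = omin(oadd(v[0], p[0]), oadd(v[1], p[2]))
--     excl = omin(oadd(v[0], p[1]), oadd(v[1], p[3]))
--     return omin(incl, excl)
-- ===== Notes on version B (the rewrite author's own statement) =====
-- stated objective: alternative
-- what changed: Recasts the incl/excl scan as a tropical (min-plus) linear system: each later element becomes a 2x2 min-plus matrix, the matrices are combined by a recursive divide-and-conquer product, and the product is applied to the start vector (arr[0], 0).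
import Mathlib
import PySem

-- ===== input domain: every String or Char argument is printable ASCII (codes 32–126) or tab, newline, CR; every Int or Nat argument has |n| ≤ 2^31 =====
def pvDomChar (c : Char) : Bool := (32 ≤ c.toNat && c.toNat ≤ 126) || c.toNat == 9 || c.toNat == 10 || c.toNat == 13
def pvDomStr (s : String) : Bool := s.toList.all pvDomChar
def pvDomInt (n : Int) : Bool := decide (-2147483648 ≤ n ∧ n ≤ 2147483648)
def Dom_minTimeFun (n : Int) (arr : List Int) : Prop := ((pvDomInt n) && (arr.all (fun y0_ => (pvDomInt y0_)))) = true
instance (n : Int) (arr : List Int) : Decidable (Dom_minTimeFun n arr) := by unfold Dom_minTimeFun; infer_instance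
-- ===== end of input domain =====

-- B re-solves the task as a tropical (min-plus) linear system evaluated by a divide-and-conquer
-- matrix product instead of A's left-to-right incl/excl scan (objective: alternative, same O(n)).

-- ===== PORT A =====
-- literal transliteration of A: incl/excl rolling scalars over range(1, n)
def minTimeFun (n : Int) (arr : List Int) : Int :=
  if n ≤ 0 then 0
  else
    let incl := (PySem.List.pyGet? arr 0).getD 0   -- in range under Pre_
    let excl : Int := 0
    let st := (PySem.List.pyRange 1 n 1).foldl
      (fun (st : Int × Int) i =>
        let incl_new := (PySem.List.pyGet? arr i).getD 0 + min st.2 st.1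
        let excl_new := st.1
        (incl_new, excl_new)) (incl, excl)
    min st.1 st.2

-- ===== PORT B =====
-- Source B's helpers: None-as-infinity min and plus (oadd/omin), 2x2 min-plus matrices (mul),
-- divide-and-conquer product (prod), then the product applied to the start vector (arr[0], 0).
def pvOadd : Option Int → Option Int → Option Int
  | some x, some y => some (x + y)
  | _, _ => none

def pvOmin : Option Int → Option Int → Option Int
  | none, y => y
  | some x, none => some x
  | some x, some y => some (min x y)   -- Python's 'x if x <= y else y'

structure PvM where
  a : Option Int
  b : Option Int
  c : Option Int
  d : Option Int
deriving DecidableEq, Repr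

def pvMul (p q : PvM) : PvM :=
  ⟨pvOmin (pvOadd p.a q.a) (pvOadd p.b q.c),
   pvOmin (pvOadd p.a q.b) (pvOadd p.b q.d),
   pvOmin (pvOadd p.c q.a) (pvOadd p.d q.c),
   pvOmin (pvOadd p.c q.b) (pvOadd p.d q.d)⟩

def pvId : PvM := ⟨some 0, none, none, some 0⟩

-- prod(ms, lo, hi): Python's index-bounded recursion over the static list = recursion on the sublist
def pvProd : List PvM → PvM
  | [] => pvId
  | [m] => m
  | m₁ :: m₂ :: rest =>
      pvMul (pvProd ((m₁ :: m₂ :: rest).take ((m₁ :: m₂ :: rest).length / 2)))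
            (pvProd ((m₁ :: m₂ :: rest).drop ((m₁ :: m₂ :: rest).length / 2)))
termination_by ms => ms.length
decreasing_by
  · simp; omega
  · simp; omega

def pvMat (x : Int) : PvM := ⟨some x, some 0, some x, none⟩

def minTimeFun_alt (n : Int) (arr : List Int) : Int :=
  if n ≤ 0 then 0
  else
    let ms := (PySem.List.slice arr (some 1) (some n)).map pvMat
    let p := pvProd ms
    let v1 := PySem.List.pyGet? arr 0      -- arr[0]; some under Pre_
    let v2 : Option Int := some 0
    let incl := pvOmin (pvOadd v1 p.a) (pvOadd v2 p.c)
    let excl := pvOmin (pvOadd v1 p.b) (pvOadd v2 p.d)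
    (pvOmin incl excl).getD 0              -- proven finite under Pre_; Python returns the int itself

-- ===== PRECONDITION & SPEC =====
-- Pre_ excludes exactly the inputs where A raises IndexError (0 < n with n > len(arr))
def Pre_minTimeFun (n : Int) (arr : List Int) : Prop := n ≤ 0 ∨ n ≤ (arr.length : Int)
instance (n : Int) (arr : List Int) : Decidable (Pre_minTimeFun n arr) := by unfold Pre_minTimeFun; infer_instance
def pvWitness_minTimeFun : Int × List Int := (3, [4, -1, 7])

def Spec_minTimeFun (n : Int) (arr : List Int) (out : Int) : Prop := out = minTimeFun_alt n arr
instance (n : Int) (arr : List Int) (out : Int) : Decidable (Spec_minTimeFun n arr out) := by unfold Spec_minTimeFun; infer_instance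

-- ===== CLAIM (what is proved, stated in full; the proofs are below) =====
def Claim_equal_minTimeFun : Prop := ∀ (n : Int) (arr : List Int), Dom_minTimeFun n arr → Pre_minTimeFun n arr → Spec_minTimeFun n arr (minTimeFun n arr)

-- ===== LEMMAS AND PROOFS =====

-- ---- algebra of pvOadd / pvOmin (the min-plus semiring on Option Int) ----
lemma pvOmin_none_right (x : Option Int) : pvOmin x none = x := by cases x <;> rfl
lemma pvOmin_none_left (x : Option Int) : pvOmin none x = x := by cases x <;> rfl
lemma pvOadd_none_right (x : Option Int) : pvOadd x none = none := by cases x <;> rfl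
lemma pvOadd_none_left (x : Option Int) : pvOadd none x = none := by cases x <;> rfl
lemma pvOadd_zero_right (x : Option Int) : pvOadd x (some 0) = x := by cases x <;> simp [pvOadd]
lemma pvOadd_zero_left (x : Option Int) : pvOadd (some 0) x = x := by cases x <;> simp [pvOadd]

lemma pvOmin_comm (x y : Option Int) : pvOmin x y = pvOmin y x := by
  cases x <;> cases y <;> simp [pvOmin, min_comm]

lemma pvOmin_assoc (x y z : Option Int) : pvOmin (pvOmin x y) z = pvOmin x (pvOmin y z) := by
  cases x <;> cases y <;> cases z <;> simp [pvOmin, min_assoc]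

lemma pvOmin_left_comm (x y z : Option Int) : pvOmin x (pvOmin y z) = pvOmin y (pvOmin x z) := by
  rw [← pvOmin_assoc, pvOmin_comm x y, pvOmin_assoc]

lemma pvOmin_comm4 (p q r s : Option Int) :
    pvOmin (pvOmin p q) (pvOmin r s) = pvOmin (pvOmin p r) (pvOmin q s) := by
  rw [pvOmin_assoc, pvOmin_left_comm q r, ← pvOmin_assoc]

lemma pvOadd_assoc (x y z : Option Int) : pvOadd (pvOadd x y) z = pvOadd x (pvOadd y z) := by
  cases x <;> cases y <;> cases z <;> simp [pvOadd, add_assoc]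

lemma pvOadd_omin_right (x y z : Option Int) :
    pvOadd (pvOmin x y) z = pvOmin (pvOadd x z) (pvOadd y z) := by
  cases x <;> cases y <;> cases z <;> simp [pvOadd, pvOmin, min_add_add_right]

lemma pvOadd_omin_left (x y z : Option Int) :
    pvOadd x (pvOmin y z) = pvOmin (pvOadd x y) (pvOadd x z) := by
  cases x <;> cases y <;> cases z <;> simp [pvOadd, pvOmin, min_add_add_left]

-- ---- 2x2 matrix algebra ----
lemma pvMul_assoc (p q r : PvM) : pvMul (pvMul p q) r = pvMul p (pvMul q r) := by
  simp only [pvMul, PvM.mk.injEq]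
  refine ⟨?_, ?_, ?_, ?_⟩ <;>
    (simp only [pvOadd_omin_right, pvOadd_omin_left, pvOadd_assoc]; exact pvOmin_comm4 _ _ _ _)

lemma pvMul_id_right (m : PvM) : pvMul m pvId = m := by
  simp [pvMul, pvId, pvOadd_none_right, pvOmin_none_right, pvOmin_none_left, pvOadd_zero_right]

lemma pvMul_id_left (m : PvM) : pvMul pvId m = m := by
  simp [pvMul, pvId, pvOadd_none_left, pvOadd_zero_left, pvOmin_none_right, pvOmin_none_left]

lemma foldr_pvMul_append (l₁ l₂ : List PvM) :
    (l₁ ++ l₂).foldr pvMul pvId = pvMul (l₁.foldr pvMul pvId) (l₂.foldr pvMul pvId) := by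
  induction l₁ with
  | nil => simp [pvMul_id_left]
  | cons m tl ih => simp [ih, pvMul_assoc]

lemma pvProd_eq_foldr (ms : List PvM) : pvProd ms = ms.foldr pvMul pvId := by
  induction ms using pvProd.induct with
  | case1 => simp [pvProd]
  | case2 m => simp [pvProd, pvMul_id_right]
  | case3 m₁ m₂ rest ih₁ ih₂ =>
      rw [pvProd, ih₁, ih₂, ← foldr_pvMul_append, List.take_append_drop]

-- ---- applying a matrix to a row vector ----
def pvVapp (v : Option Int × Option Int) (m : PvM) : Option Int × Option Int :=
  (pvOmin (pvOadd v.1 m.a) (pvOadd v.2 m.c), pvOmin (pvOadd v.1 m.b) (pvOadd v.2 m.d))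

lemma pvVapp_id (v : Option Int × Option Int) : pvVapp v pvId = v := by
  cases v with
  | mk v1 v2 =>
    simp [pvVapp, pvId, pvOadd_zero_right, pvOadd_none_right, pvOmin_none_right, pvOmin_none_left]

lemma pvVapp_mul (v : Option Int × Option Int) (p q : PvM) :
    pvVapp v (pvMul p q) = pvVapp (pvVapp v p) q := by
  simp only [pvVapp, pvMul, Prod.mk.injEq]
  refine ⟨?_, ?_⟩ <;>
    (simp only [pvOadd_omin_right, pvOadd_omin_left, pvOadd_assoc]; exact pvOmin_comm4 _ _ _ _)

lemma pvVapp_foldr (ms : List PvM) (v : Option Int × Option Int) :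
    pvVapp v (ms.foldr pvMul pvId) = ms.foldl pvVapp v := by
  induction ms generalizing v with
  | nil => simpa using pvVapp_id v
  | cons m tl ih => simp only [List.foldr_cons, List.foldl_cons, pvVapp_mul, ih]

-- ---- the scalar step of A, and the connection to pvVapp ----
def pvStepA (st : Int × Int) (x : Int) : Int × Int := (x + min st.2 st.1, st.1)

lemma pvVapp_mat (i e x : Int) :
    pvVapp (some i, some e) (pvMat x) = (some (x + min e i), some i) := by
  have h1 : min (i + x) (e + x) = x + min e i := by
    simp only [min_def]; split_ifs <;> omega
  simp [pvVapp, pvMat, pvOadd, pvOmin, h1]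

lemma foldl_pvVapp_map (ys : List Int) (i e : Int) :
    (ys.map pvMat).foldl pvVapp (some i, some e)
      = (some ((ys.foldl pvStepA (i, e)).1), some ((ys.foldl pvStepA (i, e)).2)) := by
  induction ys generalizing i e with
  | nil => simp
  | cons x tl ih =>
      simp only [List.map_cons, List.foldl_cons, pvVapp_mat]
      exact ih _ _

-- ---- A's range-indexed fold is the fold of pvStepA over the element list ----
lemma A_fold (arr : List Int) (k : Nat) (hk : k ≤ arr.length) (st : Int × Int) :
    (PySem.List.pyRange 1 (k : Int) 1).foldl
        (fun (st : Int × Int) i => ((PySem.List.pyGet? arr i).getD 0 + min st.2 st.1, st.1)) st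
      = ((arr.take k).drop 1).foldl pvStepA st := by
  induction k generalizing st with
  | zero => simp [PySem.List.pyRange_one_eq_nil (by omega : (0:Int) ≤ 1)]
  | succ m ih =>
      have hcast : ((m + 1 : Nat) : Int) = (m : Int) + 1 := by push_cast; ring
      rw [hcast]
      rcases Nat.eq_zero_or_pos m with hm | hm
      · subst hm
        rw [show ((0:Nat):Int) + 1 = 1 by norm_num,
            PySem.List.pyRange_one_eq_nil (le_refl 1)]
        have h2 : ((arr.take 1).drop 1) = [] := by
          apply List.drop_eq_nil_of_le; simp
        simp [h2]
      · have hmlen : m < arr.length := by omega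
        rw [PySem.List.pyRange_one_succ_right (by exact_mod_cast hm : (1:Int) ≤ (m:Int)),
            List.foldl_append]
        rw [ih (by omega) st]
        have htake : arr.take (m + 1) = arr.take m ++ [arr[m]] := by
          rw [List.take_add_one]
          simp [List.getElem?_eq_getElem hmlen]
        have hlen1 : 1 ≤ (arr.take m).length := by
          rw [List.length_take]; omega
        rw [htake, List.drop_append_of_le_length hlen1, List.foldl_append]
        simp [PySem.List.pyGet?_natCast, List.getElem?_eq_getElem hmlen, pvStepA]

theorem minTimeFun_spec : Claim_equal_minTimeFun := by
  intro n arr _ hpre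
  unfold Spec_minTimeFun
  by_cases hn : n ≤ 0
  · simp [minTimeFun, minTimeFun_alt, hn]
  · have hlen : n ≤ (arr.length : Int) := by
      rcases hpre with h | h
      · omega
      · exact h
    have hnk : n = (n.toNat : Int) := by omega
    have hk1 : 1 ≤ n.toNat := by omega
    have hklen : n.toNat ≤ arr.length := by omega
    have h0len : 0 < arr.length := by omega
    simp only [minTimeFun, minTimeFun_alt, hn, if_false]
    rw [hnk, A_fold arr n.toNat hklen]
    -- B side: slice = the same element list
    rw [show (1 : Int) = ((1 : Nat) : Int) by norm_num, PySem.List.slice_natCast]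
    have hys : (arr.take n.toNat).drop 1 = (arr.drop 1).take (n.toNat - 1) := by
      rw [List.drop_take]
    rw [← hys]
    -- evaluate B's matrix pipeline
    have ha0 : PySem.List.pyGet? arr 0 = some arr[0] := by
      rw [PySem.List.pyGet?_zero, List.getElem?_eq_getElem h0len]
    rw [ha0, pvProd_eq_foldr]
    have hB : ∀ (p : PvM) (v1 v2 : Option Int),
        pvOmin (pvOmin (pvOadd v1 p.a) (pvOadd v2 p.c)) (pvOmin (pvOadd v1 p.b) (pvOadd v2 p.d))
          = pvOmin (pvVapp (v1, v2) p).1 (pvVapp (v1, v2) p).2 := fun _ _ _ => rfl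
    rw [hB, pvVapp_foldr, foldl_pvVapp_map]
    simp [pvOmin]
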